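-- pv_equiv track=rewrite | github.com/Interactive-NCA/control-pcgnca | pcgnca/utils/markdown_summary.py | _extract_nested_results
-- ===== SOURCE A (Python) =====
-- def _extract_nested_results(nested_results, expids):
--
--     # - Save the results in dict where each key is row name
--     # and each values includes row values
--     result = dict()
--
--     # - Go over all nested results
--     for high_level_name, results in nested_results.items():
--
--         # -- Extract the the row names
--         result_names = list(results[expids[0]].keys())
--         for i, result_name in enumerate(result_names):
--             row = []
--
--             # -- Finally, check the value of the result in each experiment
--             for expid in expids:
--                 v = results[expid][result_name]
--                 v = v if v is not None else "0"
--                 row.append(v)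
--             result[high_level_name.upper() + " " + result_name] = row
--
--     return result
-- ===== SOURCE B (Python) =====
-- def _extract_nested_results(nested_results, expids):
--     # Column-wise decomposition: build one column of values per experiment,
--     # then transpose with zip(*columns) to recover the rows.
--     result = dict()
--     for high_level_name, results in nested_results.items():
--         result_names = list(results[expids[0]].keys())
--         columns = [["0" if results[e][rn] is None else results[e][rn]
--                     for rn in result_names] for e in expids]
--         prefix = high_level_name.upper() + " "
--         for result_name, row in zip(result_names, zip(*columns)):
--             result[prefix + result_name] = list(row)
--     return result
-- ===== Notes on version B (the rewrite author's own statement) =====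
-- stated objective: alternative
-- what changed: B builds one column of values per experiment and transposes the columns with zip(*columns) to obtain the rows, instead of A's row-at-a-time inner loop over experiments.
import Mathlib
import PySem

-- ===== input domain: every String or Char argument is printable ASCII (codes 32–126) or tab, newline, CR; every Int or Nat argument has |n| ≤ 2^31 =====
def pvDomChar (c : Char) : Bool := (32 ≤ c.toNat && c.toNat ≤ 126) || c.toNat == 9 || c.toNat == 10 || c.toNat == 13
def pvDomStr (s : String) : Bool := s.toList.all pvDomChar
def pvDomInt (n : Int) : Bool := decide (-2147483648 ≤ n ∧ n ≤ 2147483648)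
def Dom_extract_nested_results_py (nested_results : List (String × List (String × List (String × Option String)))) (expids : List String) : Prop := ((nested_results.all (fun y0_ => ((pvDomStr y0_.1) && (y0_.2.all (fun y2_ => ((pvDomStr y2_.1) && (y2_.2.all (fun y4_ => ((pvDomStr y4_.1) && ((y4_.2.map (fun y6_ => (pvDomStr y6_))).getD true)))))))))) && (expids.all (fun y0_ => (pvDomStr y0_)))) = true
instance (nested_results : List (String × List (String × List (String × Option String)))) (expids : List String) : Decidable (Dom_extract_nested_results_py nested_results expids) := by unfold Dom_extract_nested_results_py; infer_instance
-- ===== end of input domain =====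

-- B replaces A's row-at-a-time inner loop with per-experiment columns transposed by zip(*columns); same cost, different decomposition.

-- shared dict-lookup helper (Python dict lookup, first match) and the value-with-None→"0" rule,
-- identical expressions in both Pythons
def pvLookup {α : Type} (l : List (String × α)) (k : String) : Option α :=
  (PySem.Dict.mk l).get? k

-- results[expid][result_name] with None→"0"; the 'none' (KeyError) branches are excluded by Pre_
def pvCell (results : List (String × List (String × Option String))) (e rn : String) : String :=
  match pvLookup results e with
  | none => "0"
  | some re =>
    match pvLookup re rn with
    | none => "0"
    | some v => v.getD "0"

-- list(results[expids[0]].keys()); none branches (IndexError/KeyError) excluded by Pre_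
def pvRowNames (results : List (String × List (String × Option String))) (expids : List String) : List String :=
  match PySem.List.pyGet? expids 0 with
  | none => []
  | some e0 =>
    match pvLookup results e0 with
    | none => []
    | some r0 => r0.map (·.1)

-- ===== PORT A =====
def extract_nested_results_py (nested_results : List (String × List (String × List (String × Option String)))) (expids : List String) : List (String × List String) :=
  (nested_results.foldl
    (fun (result : PySem.Dict String (List String)) hr =>
      let result_names := pvRowNames hr.2 expids
      result_names.foldl
        (fun result result_name =>
          let row := expids.foldl (fun row expid => row ++ [pvCell hr.2 expid result_name]) []
          result.insert ((PySem.Str.upper hr.1 ++ " ") ++ result_name) row)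
        result)
    PySem.Dict.empty).items

-- ===== PORT B =====
-- zip(*columns): peel one element off the head of every remaining column
def pvZipHeads {α : Type} : List (List α) → Option (List α × List (List α))
  | [] => some ([], [])
  | [] :: _ => none
  | (a :: as) :: rest => (pvZipHeads rest).map (fun p => (a :: p.1, as :: p.2))

def pvZipStarAux {α : Type} : List α → List (List α) → List (List α)
  | [], _ => []
  | a :: as, rest =>
    match pvZipHeads rest with
    | none => []
    | some p => (a :: p.1) :: pvZipStarAux as p.2

def pvZipStar {α : Type} : List (List α) → List (List α)
  | [] => []
  | c :: rest => pvZipStarAux c rest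

def extract_nested_results_py_alt (nested_results : List (String × List (String × List (String × Option String)))) (expids : List String) : List (String × List String) :=
  (nested_results.foldl
    (fun (result : PySem.Dict String (List String)) hr =>
      let result_names := pvRowNames hr.2 expids
      let columns := expids.map (fun e => result_names.map (fun rn => pvCell hr.2 e rn))
      let pfx := PySem.Str.upper hr.1 ++ " "
      (result_names.zip (pvZipStar columns)).foldl
        (fun result p => result.insert (pfx ++ p.1) p.2)
        result)
    PySem.Dict.empty).items

-- ===== PRECONDITION & SPEC =====
-- Pre_ excludes exactly the inputs where A raises: expids empty while nested_results is not
-- (IndexError on expids[0]), or a needed key missing (KeyError).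
def Pre_extract_nested_results_py (nested_results : List (String × List (String × List (String × Option String)))) (expids : List String) : Prop :=
  (nested_results ≠ [] → expids ≠ []) ∧
  ∀ p ∈ nested_results,
    expids.headI ∈ p.2.map (·.1) ∧
    ∀ rn ∈ ((pvLookup p.2 expids.headI).getD []).map (·.1),
      ∀ e ∈ expids,
        e ∈ p.2.map (·.1) ∧ rn ∈ ((pvLookup p.2 e).getD []).map (·.1)
instance (nested_results : List (String × List (String × List (String × Option String)))) (expids : List String) : Decidable (Pre_extract_nested_results_py nested_results expids) := by unfold Pre_extract_nested_results_py; infer_instance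

def pvWitness_extract_nested_results_py : (List (String × List (String × List (String × Option String)))) × List String :=
  ([("acc", [("e1", [("mean", some "1"), ("max", none)]), ("e2", [("mean", some "2"), ("max", some "3")])])], ["e1", "e2"])

def Spec_extract_nested_results_py (nested_results : List (String × List (String × List (String × Option String)))) (expids : List String) (out : List (String × List String)) : Prop := out = extract_nested_results_py_alt nested_results expids
instance (nested_results : List (String × List (String × List (String × Option String)))) (expids : List String) (out : List (String × List String)) : Decidable (Spec_extract_nested_results_py nested_results expids out) := by unfold Spec_extract_nested_results_py; infer_instance

-- ===== CLAIM (what is proved, stated in full; the proofs are below) =====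
def Claim_equal_extract_nested_results_py : Prop := ∀ (nested_results : List (String × List (String × List (String × Option String)))) (expids : List String), Dom_extract_nested_results_py nested_results expids → Pre_extract_nested_results_py nested_results expids → Spec_extract_nested_results_py nested_results expids (extract_nested_results_py nested_results expids)

-- ===== LEMMAS AND PROOFS =====

lemma pv_foldl_append_map {α β : Type} (f : β → α) :
    ∀ (l : List β) (acc : List α), l.foldl (fun r x => r ++ [f x]) acc = acc ++ l.map f
  | [], acc => by simp
  | x :: l, acc => by simp [pv_foldl_append_map f l]

lemma pvZipHeads_map {α β : Type} (h : β → α) (t : β → List α) :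
    ∀ (es : List β), pvZipHeads (es.map fun e => h e :: t e) = some (es.map h, es.map t)
  | [] => by simp [pvZipHeads]
  | e :: es => by simp [pvZipHeads, pvZipHeads_map h t es]

lemma pvZipStarAux_map {α β γ : Type} (g : β → γ → α) (e : β) (es : List β) :
    ∀ (rns : List γ),
      pvZipStarAux (rns.map (g e)) (es.map fun e' => rns.map (g e')) =
        rns.map (fun rn => g e rn :: es.map (fun e' => g e' rn))
  | [] => by simp [pvZipStarAux]
  | rn :: rns => by
    have h := pvZipHeads_map (fun e' => g e' rn) (fun e' => rns.map (g e')) es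
    simp only [List.map_cons, pvZipStarAux, h, pvZipStarAux_map g e es rns]

lemma pv_zip_self_map {α β : Type} (r : α → β) :
    ∀ (l : List α), l.zip (l.map r) = l.map (fun a => (a, r a))
  | [] => by simp
  | a :: l => by simp [pv_zip_self_map r l]

lemma pv_body_eq (hr : String × List (String × List (String × Option String)))
    (expids : List String) (result : PySem.Dict String (List String)) :
    (pvRowNames hr.2 expids).foldl
        (fun result result_name =>
          result.insert ((PySem.Str.upper hr.1 ++ " ") ++ result_name)
            (expids.foldl (fun row expid => row ++ [pvCell hr.2 expid result_name]) []))
        result =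
      ((pvRowNames hr.2 expids).zip
          (pvZipStar (expids.map (fun e => (pvRowNames hr.2 expids).map (fun rn => pvCell hr.2 e rn))))).foldl
        (fun result p => result.insert ((PySem.Str.upper hr.1 ++ " ") ++ p.1) p.2)
        result := by
  cases expids with
  | nil =>
    simp [pvRowNames, PySem.List.pyGet?, PySem.List.pyIdx?]
  | cons e es =>
    rw [show (e :: es).map (fun e' => (pvRowNames hr.2 (e :: es)).map (fun rn => pvCell hr.2 e' rn)) =
          ((pvRowNames hr.2 (e :: es)).map (pvCell hr.2 e)) ::
            (es.map fun e' => (pvRowNames hr.2 (e :: es)).map (fun rn => pvCell hr.2 e' rn)) from rfl]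
    show _ = ((pvRowNames hr.2 (e :: es)).zip (pvZipStarAux _ _)).foldl _ _
    rw [pvZipStarAux_map (fun e' rn => pvCell hr.2 e' rn) e es]
    rw [pv_zip_self_map, List.foldl_map]
    apply PySem.List.foldl_congr_mem
    intro d rn _
    rw [pv_foldl_append_map (fun expid => pvCell hr.2 expid rn) (e :: es) []]
    simp

lemma pv_eq_all (nested_results : List (String × List (String × List (String × Option String))))
    (expids : List String) :
    extract_nested_results_py nested_results expids = extract_nested_results_py_alt nested_results expids := by
  unfold extract_nested_results_py extract_nested_results_py_alt
  congr 1
  apply PySem.List.foldl_congr_mem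
  intro d hr _
  exact pv_body_eq hr expids d

-- ===== VERDICT (by name: the statement is the Claim_ definition above) =====
theorem extract_nested_results_py_spec : Claim_equal_extract_nested_results_py := by
  intro nested_results expids _ _
  unfold Spec_extract_nested_results_py
  exact pv_eq_all nested_results expids
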